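-- pv_equiv track=rewrite | github.com/iDorgham/Ai-Workspace-Factory-AIWF | factory/library/01-software-engineering/developing/scripts/test-flag-parser.py | extract_command_and_flags
-- ===== SOURCE A (Python) =====
-- def extract_command_and_flags(tokens):
--     """Separate command from flags."""
--     command_tokens = []
--     flag_tokens = []
--
--     parsing_command = True
--     for token in tokens:
--         if token.startswith("--"):
--             parsing_command = False
--             flag_tokens.append(token)
--         elif parsing_command:
--             command_tokens.append(token)
--         else:
--             flag_tokens.append(token)
--
--     command = " ".join(command_tokens)
--     return command, flag_tokens
-- ===== SOURCE B (Python) =====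
-- def extract_command_and_flags(tokens):
--     """Separate command from flags."""
--     i = next((j for j, t in enumerate(tokens) if t.startswith("--")), len(tokens))
--     return " ".join(tokens[:i]), list(tokens[i:])
-- ===== Notes on version B (the rewrite author's own statement) =====
-- stated objective: simpler
-- what changed: Replaces the stateful parsing_command toggle and per-element branch classification with a find-first-boundary-then-slice decomposition: locate the first token starting with '--' and slice the list there.
import Mathlib
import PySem

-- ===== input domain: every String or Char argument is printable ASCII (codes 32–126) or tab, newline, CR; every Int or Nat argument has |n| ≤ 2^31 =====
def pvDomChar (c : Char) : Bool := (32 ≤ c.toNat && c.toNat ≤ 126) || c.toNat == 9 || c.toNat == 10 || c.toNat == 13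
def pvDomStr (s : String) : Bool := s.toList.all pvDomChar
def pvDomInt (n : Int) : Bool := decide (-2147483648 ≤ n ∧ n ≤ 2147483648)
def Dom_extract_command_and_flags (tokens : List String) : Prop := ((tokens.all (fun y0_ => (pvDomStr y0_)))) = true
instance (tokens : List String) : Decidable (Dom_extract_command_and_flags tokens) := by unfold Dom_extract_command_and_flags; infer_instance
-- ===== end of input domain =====

-- B replaces A's stateful parsing_command toggle with find-first-"--"-boundary then slice (simpler decomposition).


-- ===== PORT A =====
-- the for-loop of A as structural recursion over the same state (command_tokens, flag_tokens, parsing_command)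
def pvLoopA : List String → List String → List String → Bool → List String × List String
  | [], cmd, flags, _ => (cmd, flags)
  | t :: ts, cmd, flags, parsing =>
    if PySem.Str.startswith t "--" then pvLoopA ts cmd (flags ++ [t]) false
    else if parsing then pvLoopA ts (cmd ++ [t]) flags parsing
    else pvLoopA ts cmd (flags ++ [t]) parsing

def extract_command_and_flags (tokens : List String) : String × List String :=
  let r := pvLoopA tokens [] [] true
  (PySem.Str.join " " r.1, r.2)

-- ===== PORT B =====
def extract_command_and_flags_alt (tokens : List String) : String × List String :=
  let i := tokens.findIdx (fun t => PySem.Str.startswith t "--")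
  (PySem.Str.join " " (tokens.take i), tokens.drop i)

-- ===== PRECONDITION & SPEC =====
def Spec_extract_command_and_flags (tokens : List String) (out : String × List String) : Prop := out = extract_command_and_flags_alt tokens
instance (tokens : List String) (out : String × List String) : Decidable (Spec_extract_command_and_flags tokens out) := by unfold Spec_extract_command_and_flags; infer_instance

-- ===== CLAIM (what is proved, stated in full; the proofs are below) =====
def Claim_equal_extract_command_and_flags : Prop := ∀ (tokens : List String), Dom_extract_command_and_flags tokens → Spec_extract_command_and_flags tokens (extract_command_and_flags tokens)

-- ===== LEMMAS AND PROOFS =====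
theorem pvLoopA_false (ts cmd flags : List String) :
    pvLoopA ts cmd flags false = (cmd, flags ++ ts) := by
  induction ts generalizing flags with
  | nil => simp [pvLoopA]
  | cons t ts ih =>
    simp only [pvLoopA]
    split <;> simp [ih]

theorem pvLoopA_true (ts cmd flags : List String) :
    pvLoopA ts cmd flags true =
      (cmd ++ ts.take (ts.findIdx (fun t => PySem.Str.startswith t "--")),
       flags ++ ts.drop (ts.findIdx (fun t => PySem.Str.startswith t "--"))) := by
  induction ts generalizing cmd with
  | nil => simp [pvLoopA]
  | cons t ts ih =>
    by_cases h : PySem.Chars.startswith t.toList ['-', '-']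
    · simp [pvLoopA, List.findIdx_cons, h, pvLoopA_false]
    · simp [pvLoopA, List.findIdx_cons, h, ih]

-- ===== VERDICT (by name: the statement is the Claim_ definition above) =====
theorem extract_command_and_flags_spec : Claim_equal_extract_command_and_flags := by
  intro tokens _
  unfold Spec_extract_command_and_flags extract_command_and_flags extract_command_and_flags_alt
  simp [pvLoopA_true]
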